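-- pv_equiv track=rewrite | github.com/mchaput/whoosh | src/whoosh/lang/porter.py | consonant
-- ===== SOURCE A (Python) =====
-- vowels = frozenset(['a', 'e', 'i', 'o', 'u'])
--
-- def consonant(word, i):
--     if word[i] in vowels:
--         return False
--     if word[i] == 'y':
--         if i == 0:
--             return True
--         else:
--             return not consonant(word, i - 1)
--     return True
-- ===== SOURCE B (Python) =====
-- vowels = frozenset(['a', 'e', 'i', 'o', 'u'])
--
-- def consonant(word, i):
--     # Closed form: the answer depends only on word[i], the length of the run of
--     # 'y's ending at i, and the character just before that run (parity of the
--     # run decides whether the base answer is negated).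
--     c = word[i]
--     if c in vowels:
--         return False
--     if c != 'y':
--         return True
--     p = i if i >= 0 else len(word) + i
--     r = len(word[:p].rstrip('y'))   # positions r..p are all 'y'
--     if r == 0:
--         return p % 2 == 0
--     base = word[r - 1] not in vowels
--     return base != ((p - r) % 2 == 0)
-- ===== Notes on version B (the rewrite author's own statement) =====
-- stated objective: alternative
-- what changed: Replaces A's recursion (which negates the result while unwinding through each 'y') with a closed form: slice off the prefix, rstrip its trailing 'y's to locate the run of 'y's below position i, and decide by the run's parity and the character before the run.
-- crash fix: On a negative in-range index whose whole effective prefix consists of 'y's, A's recursion walks off the left end of the string and raises IndexError, while B returns the run-parity value (e.g. False for ('yy', -1)). — e.g. on consonant("yy", -1): A raises IndexError, B returns false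
import Mathlib
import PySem

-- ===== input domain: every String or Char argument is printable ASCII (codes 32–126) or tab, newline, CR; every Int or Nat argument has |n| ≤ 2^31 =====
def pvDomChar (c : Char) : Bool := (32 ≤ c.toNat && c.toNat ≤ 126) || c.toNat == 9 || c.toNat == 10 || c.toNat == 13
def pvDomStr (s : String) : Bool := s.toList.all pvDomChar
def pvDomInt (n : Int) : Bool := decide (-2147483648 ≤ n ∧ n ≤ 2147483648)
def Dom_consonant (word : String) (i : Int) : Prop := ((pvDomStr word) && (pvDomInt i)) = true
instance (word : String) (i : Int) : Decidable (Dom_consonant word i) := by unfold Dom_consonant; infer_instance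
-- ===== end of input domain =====

-- B replaces A's recursion by a closed form: strip the run of 'y's below position i
-- in one slice-and-rstrip step and decide by the run's parity; same cost, no recursion.

-- ===== PORT A =====
def pvVowels : List Char := ['a', 'e', 'i', 'o', 'u']

-- A's recursion; `none` models the IndexError that word[i] raises out of range
-- (the exception propagates through the recursion, hence Option and .map).
def consAuxA (cs : List Char) (i : Int) : Option Bool :=
  match h : PySem.List.pyGet? cs i with
  | none => none
  | some c =>
    if c ∈ pvVowels then some false
    else if c = 'y' then
      if i = 0 then some true
      else (consAuxA cs (i - 1)).map (fun b => !b)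
    else some true
termination_by (if 0 ≤ i then i.toNat else ((cs.length : Int) + i + 1).toNat)
decreasing_by
  have hr : PySem.Raise.InRange cs.length i := by
    by_contra hc
    rw [← PySem.List.pyGet?_eq_none_iff] at hc
    simp [hc] at h
  rcases hr with ⟨h1, h2⟩
  split_ifs with p q <;> omega

def consonant (word : String) (i : Int) : Bool :=
  (consAuxA word.toList i).getD false

-- ===== PORT B =====
-- B: c = word[i] (pyGet?; `none` = the IndexError, excluded by Pre_); then the
-- closed form: p = effective position, r = len(word[:p].rstrip('y')) — rstrip('y')
-- is ported exactly, step for step, as dropWhile (· = 'y') on the reversed prefix.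
def consonant_alt (word : String) (i : Int) : Bool :=
  match PySem.List.pyGet? word.toList i with
  | none => false
  | some c =>
    if c ∈ pvVowels then false
    else if c ≠ 'y' then true
    else
      let p : Nat := (if 0 ≤ i then i else (word.toList.length : Int) + i).toNat
      let r : Nat := ((word.toList.take p).reverse.dropWhile (· = 'y')).length
      if r = 0 then decide (p % 2 = 0)
      else
        (!(pvVowels.contains ((PySem.List.pyGet? word.toList ((r : Int) - 1)).getD ' ')))
          != decide ((p - r) % 2 = 0)

-- ===== PRECONDITION & SPEC =====
-- Pre_ excludes exactly the inputs on which the Python A raises IndexError: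
-- i out of range, or a negative i whose whole prefix of effective positions is 'y'
-- (the recursion then walks off the left end of the string).
def Pre_consonant (word : String) (i : Int) : Prop :=
  (0 ≤ i ∧ i < word.toList.length) ∨
  (i < 0 ∧ 0 ≤ (word.toList.length : Int) + i ∧
    ¬ (∀ c ∈ word.toList.take ((word.toList.length : Int) + i + 1).toNat, c = 'y'))
instance (word : String) (i : Int) : Decidable (Pre_consonant word i) := by
  unfold Pre_consonant; infer_instance
def pvWitness_consonant : String × Int := ("by", 1)

-- On a negative in-range i whose whole effective prefix is 'y', A's recursion walks
-- off the left end and raises IndexError, while B returns the run-parity value.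
def Raises_consonant (word : String) (i : Int) : Prop :=
  i < 0 ∧ 0 ≤ (word.toList.length : Int) + i ∧
    (∀ c ∈ word.toList.take ((word.toList.length : Int) + i + 1).toNat, c = 'y')
instance (word : String) (i : Int) : Decidable (Raises_consonant word i) := by
  unfold Raises_consonant; infer_instance
def pvRaiseWitness_consonant : String × Int := ("yy", -1)
def pvRaiseWitnessOut_consonant : Bool := false

def Spec_consonant (word : String) (i : Int) (out : Bool) : Prop := out = consonant_alt word i
instance (word : String) (i : Int) (out : Bool) : Decidable (Spec_consonant word i out) := by unfold Spec_consonant; infer_instance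

-- ===== CLAIM (what is proved, stated in full; the proofs are below) =====
def Claim_equal_consonant : Prop := ∀ (word : String) (i : Int), Dom_consonant word i → Pre_consonant word i → Spec_consonant word i (consonant word i)
def Claim_raises_consonant : Prop := (∀ (word : String) (i : Int), Dom_consonant word i → Raises_consonant word i → ¬ Pre_consonant word i) ∧ (Dom_consonant (pvRaiseWitness_consonant.1) (pvRaiseWitness_consonant.2) ∧ Raises_consonant (pvRaiseWitness_consonant.1) (pvRaiseWitness_consonant.2) ∧ consonant_alt (pvRaiseWitness_consonant.1) (pvRaiseWitness_consonant.2) = pvRaiseWitnessOut_consonant)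

-- ===== LEMMAS AND PROOFS =====

-- proof-only helpers --
-- r = len of the prefix below position p with its trailing 'y's stripped
def pvRR (cs : List Char) (p : Nat) : Nat :=
  ((cs.take p).reverse.dropWhile (· = 'y')).length

-- closed-form value of B at effective (nonnegative) position p
def pvAltPos (cs : List Char) (p : Nat) : Bool :=
  match cs[p]? with
  | none => false
  | some c =>
    if c ∈ pvVowels then false
    else if c ≠ 'y' then true
    else
      let r := pvRR cs p
      if r = 0 then decide (p % 2 = 0)
      else
        (!(pvVowels.contains ((PySem.List.pyGet? cs ((r : Int) - 1)).getD ' ')))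
          != decide ((p - r) % 2 = 0)

lemma pvRR_le (cs : List Char) (p : Nat) : pvRR cs p ≤ p := by
  calc ((cs.take p).reverse.dropWhile (· = 'y')).length
      ≤ (cs.take p).reverse.length := List.length_dropWhile_le _ _
    _ ≤ p := by simp [List.length_take]

lemma pvRR_succ (cs : List Char) (p : Nat) (hp : p < cs.length) :
    pvRR cs (p + 1) = if cs[p] = 'y' then pvRR cs p else p + 1 := by
  unfold pvRR
  rw [List.take_succ, List.getElem?_eq_getElem hp]
  simp only [Option.toList, List.reverse_append, List.reverse_cons, List.reverse_nil,
    List.nil_append, List.cons_append, List.dropWhile_cons]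
  by_cases h : cs[p] = 'y'
  · simp [h]
  · simp [h, List.length_take, Nat.min_eq_left (Nat.le_of_lt hp)]

lemma pvRR_zero (cs : List Char) : pvRR cs 0 = 0 := by
  simp [pvRR]

-- the toggle law of the closed form along a 'y'
lemma pvAltPos_toggle (cs : List Char) (p : Nat) (hp : p + 1 < cs.length)
    (hy : cs[p + 1] = 'y') : pvAltPos cs (p + 1) = ! pvAltPos cs p := by
  have hplt : p < cs.length := by omega
  have hv : ('y' : Char) ∈ pvVowels ↔ False := by decide
  unfold pvAltPos
  rw [List.getElem?_eq_getElem hp, List.getElem?_eq_getElem hplt]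
  simp only [hy, hv, iff_false, if_neg (by simp : ¬ False), ne_eq, not_true_eq_false,
    if_false, if_true]
  rw [pvRR_succ cs p hplt]
  by_cases hq : cs[p] = 'y'
  · -- previous char also 'y': same r, parity flips
    simp only [hq, if_true, hv]
    have hv2 : (cs[p] ∈ pvVowels) = False := by rw [hq]; simp [pvVowels]
    simp only [hq, hv2, if_neg (by simp : ¬ False), ne_eq, not_true_eq_false, if_false]
    by_cases hr : pvRR cs p = 0
    · simp only [hr, if_true]
      rcases Nat.even_or_odd p with he | ho
      · have h1 : p % 2 = 0 := Nat.even_iff.mp he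
        have h2 : (p + 1) % 2 = 1 := by omega
        simp [h1, h2]
      · have h1 : p % 2 = 1 := Nat.odd_iff.mp ho
        have h2 : (p + 1) % 2 = 0 := by omega
        simp [h1, h2]
    · simp only [hr, if_false]
      have hle : pvRR cs p ≤ p := pvRR_le cs p
      set r := pvRR cs p with hrdef
      have h1 : 1 ≤ r := Nat.one_le_iff_ne_zero.mpr hr
      rcases Nat.even_or_odd (p - r) with he | ho
      · have e1 : (p - r) % 2 = 0 := Nat.even_iff.mp he
        have e2 : (p + 1 - r) % 2 = 1 := by omega
        simp [e1, e2]
      · have e1 : (p - r) % 2 = 1 := Nat.odd_iff.mp ho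
        have e2 : (p + 1 - r) % 2 = 0 := by omega
        simp [e1, e2]
  · -- run starts at p+1: base is the test on cs[p]
    simp only [hq, if_false]
    have hne : ¬ (p + 1 = 0) := by omega
    simp only [hne, if_false]
    have hsub : (p + 1) - (p + 1) = 0 := by omega
    have hget : PySem.List.pyGet? cs (((p + 1 : Nat) : Int) - 1) = some cs[p] := by
      have : ((p + 1 : Nat) : Int) - 1 = ((p : Nat) : Int) := by push_cast; ring
      rw [this]
      simp [PySem.List.pyGet?_natCast, List.getElem?_eq_getElem hplt]
    rw [hget]
    simp only [Option.getD_some, hsub]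
    by_cases hvp : cs[p] ∈ pvVowels
    · have hc : pvVowels.contains cs[p] = true := by
        simpa [List.contains_iff_mem] using hvp
      simp [hvp, hc]
    · have hc : pvVowels.contains cs[p] = false := by
        simpa [List.contains_iff_mem] using hvp
      simp [hvp, hq, hc]

-- A's recursion computes the closed form at every in-range nonnegative position
lemma consAuxA_eq_altPos (cs : List Char) (p : Nat) (hp : p < cs.length) :
    consAuxA cs (p : Int) = some (pvAltPos cs p) := by
  induction p with
  | zero =>
    rw [consAuxA]
    have hg : PySem.List.pyGet? cs ((0 : Nat) : Int) = some cs[0] := by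
      simp only [PySem.List.pyGet?_natCast, List.getElem?_eq_getElem hp]
    split
    · rename_i heq; rw [hg] at heq; exact absurd heq (by simp)
    · rename_i c heq
      rw [hg] at heq; injection heq with heq; subst heq
      unfold pvAltPos
      rw [List.getElem?_eq_getElem hp, pvRR_zero]
      by_cases hv : cs[0] ∈ pvVowels
      · simp [hv]
      · by_cases hy : cs[0] = 'y'
        · rw [hy]
          simp [show ¬ ('y' : Char) ∈ pvVowels by decide]
        · simp [hv, hy]
  | succ p ih =>
    have hplt : p < cs.length := by omega
    rw [consAuxA]
    have hg : PySem.List.pyGet? cs (((p + 1 : Nat)) : Int) = some cs[p + 1] := by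
      simp only [PySem.List.pyGet?_natCast, List.getElem?_eq_getElem hp]
    split
    · rename_i heq; rw [hg] at heq; exact absurd heq (by simp)
    · rename_i c heq
      rw [hg] at heq; injection heq with heq; subst heq
      by_cases hv : cs[p + 1] ∈ pvVowels
      · simp only [hv, if_true]
        unfold pvAltPos
        rw [List.getElem?_eq_getElem hp]
        simp [hv]
      · by_cases hy : cs[p + 1] = 'y'
        · have hne : ¬ (((p + 1 : Nat) : Int) = 0) := by omega
          have hstep : ((p + 1 : Nat) : Int) - 1 = ((p : Nat) : Int) := by push_cast; ring
          rw [hy, if_neg (show ¬ ('y' : Char) ∈ pvVowels by decide), if_pos rfl,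
            if_neg hne, hstep, ih hplt, pvAltPos_toggle cs p hp hy]
          rfl
        · simp only [hv, if_false, hy, if_false]
          unfold pvAltPos
          rw [List.getElem?_eq_getElem hp]
          simp [hv, hy]

-- for negative i whose effective prefix contains a non-'y', A's recursion never
-- reaches the i = 0 branch and computes the closed form at position p = len + i
lemma consAuxA_neg (cs : List Char) (p : Nat) (hp : p < cs.length)
    (hnall : ¬ (∀ c ∈ cs.take (p + 1), c = 'y')) :
    ∀ i : Int, i < 0 → (cs.length : Int) + i = p → consAuxA cs i = some (pvAltPos cs p) := by
  induction p with
  | zero =>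
    intro i hi hpi
    have h0 : cs[0] ≠ 'y' := by
      intro h
      apply hnall
      intro c hc
      rw [show (0 + 1 = 1) from rfl, List.take_add_one, List.take_zero] at hc
      simp only [List.nil_append, List.getElem?_eq_getElem hp] at hc
      simp only [Option.toList, List.mem_cons, List.not_mem_nil, or_false] at hc
      rw [hc, h]
    have hkeq : i = -((cs.length : Nat) : Int) := by omega
    have hg : PySem.List.pyGet? cs i = some cs[0] := by
      rw [hkeq, PySem.List.pyGet?_neg_natCast cs cs.length (by omega) (by omega)]
      simp [List.getElem?_eq_getElem hp]
    rw [consAuxA]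
    split
    · rename_i heq; rw [hg] at heq; exact absurd heq (by simp)
    · rename_i c heq
      rw [hg] at heq; injection heq with heq; subst heq
      unfold pvAltPos
      rw [List.getElem?_eq_getElem hp]
      by_cases hv : cs[0] ∈ pvVowels
      · simp [hv]
      · simp [hv, h0]
  | succ p ih =>
    intro i hi hpi
    have hplt : p < cs.length := by omega
    have hg : PySem.List.pyGet? cs i = some cs[p + 1] := by
      have hkeq : i = -(((-i).toNat : Nat) : Int) := by omega
      rw [hkeq, PySem.List.pyGet?_neg_natCast cs (-i).toNat (by omega) (by omega)]
      have : cs.length - (-i).toNat = p + 1 := by omega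
      rw [this]
      simp [List.getElem?_eq_getElem hp]
    rw [consAuxA]
    split
    · rename_i heq; rw [hg] at heq; exact absurd heq (by simp)
    · rename_i c heq
      rw [hg] at heq; injection heq with heq; subst heq
      by_cases hv : cs[p + 1] ∈ pvVowels
      · simp only [hv, if_true]
        unfold pvAltPos
        rw [List.getElem?_eq_getElem hp]
        simp [hv]
      · by_cases hy : cs[p + 1] = 'y'
        · have hnall' : ¬ (∀ c ∈ cs.take (p + 1), c = 'y') := by
            intro hall
            apply hnall
            intro c hc
            rw [List.take_add_one, List.getElem?_eq_getElem hp] at hc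
            simp only [Option.toList, List.mem_append, List.mem_cons,
              List.not_mem_nil, or_false] at hc
            rcases hc with hc | hc
            · exact hall c hc
            · rw [hc, hy]
          have hi0 : ¬ (i = 0) := by omega
          rw [hy, if_neg (show ¬ ('y' : Char) ∈ pvVowels by decide), if_pos rfl,
            if_neg hi0, ih hplt hnall' (i - 1) (by omega) (by omega),
            pvAltPos_toggle cs p hp hy]
          rfl
        · simp only [hv, if_false, hy, if_false]
          unfold pvAltPos
          rw [List.getElem?_eq_getElem hp]
          simp [hv, hy]

-- B's port computes the closed form at the effective position
lemma alt_eq_altPos (word : String) (i : Int) (p : Nat) (hp : p < word.toList.length)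
    (hpi : (if 0 ≤ i then i else ((word.toList.length : Nat) : Int) + i) = (p : Int))
    (hg : PySem.List.pyGet? word.toList i = some word.toList[p]) :
    consonant_alt word i = pvAltPos word.toList p := by
  unfold consonant_alt pvAltPos
  rw [hg, List.getElem?_eq_getElem hp]
  simp only [hpi, pvRR, Int.toNat_natCast]
  rfl

-- ===== VERDICT (by name: the statement is the Claim_ definition above) =====
theorem consonant_spec : Claim_equal_consonant := by
  intro word i _ hpre
  unfold Spec_consonant
  rcases hpre with ⟨h0, hlt⟩ | ⟨hneg, hge, hnall⟩
  · set p : Nat := i.toNat with hpdef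
    have hip : i = (p : Int) := by omega
    have hp : p < word.toList.length := by omega
    have hg : PySem.List.pyGet? word.toList i = some word.toList[p] := by
      rw [hip]
      simp only [PySem.List.pyGet?_natCast, List.getElem?_eq_getElem hp]
    rw [alt_eq_altPos word i p hp (by rw [if_pos h0]; omega) hg]
    unfold consonant
    rw [hip, consAuxA_eq_altPos word.toList p hp]
    rfl
  · set p : Nat := ((word.toList.length : Int) + i).toNat with hpdef
    have hp : p < word.toList.length := by omega
    have hg : PySem.List.pyGet? word.toList i = some word.toList[p] := by
      have hkeq : i = -(((-i).toNat : Nat) : Int) := by omega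
      rw [hkeq, PySem.List.pyGet?_neg_natCast word.toList (-i).toNat (by omega) (by omega)]
      have : word.toList.length - (-i).toNat = p := by omega
      rw [this]
      simp [List.getElem?_eq_getElem hp]
    have hnall' : ¬ (∀ c ∈ word.toList.take (p + 1), c = 'y') := by
      have : ((word.toList.length : Int) + i + 1).toNat = p + 1 := by omega
      rw [this] at hnall
      exact hnall
    rw [alt_eq_altPos word i p hp (by rw [if_neg (by omega)]; omega) hg]
    unfold consonant
    rw [consAuxA_neg word.toList p hp hnall' i hneg (by omega)]
    rfl

@[simp] theorem consonant_raises : Claim_raises_consonant := by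
  unfold Claim_raises_consonant
  constructor
  · intro word i _ hr hpre
    rcases hr with ⟨h1, h2, h3⟩
    rcases hpre with ⟨h4, _⟩ | ⟨_, _, h6⟩
    · omega
    · exact h6 h3
  · refine ⟨by decide, ?_, by decide⟩
    unfold Raises_consonant pvRaiseWitness_consonant
    norm_num
    refine ⟨by decide, ?_⟩
    intro c hc
    simp [show ("yy".toList = ['y', 'y']) from rfl,
      show ("yy".length = 2) from rfl] at hc
    simp [hc]
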